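-- pv_equiv track=rewrite | github.com/kevin123488/algorithm | 2024/3월/0311/1316.py | find_group_word
-- ===== SOURCE A (Python) =====
-- def find_group_word(a):
--     # 각 문자가 연속해서 나오는 단어인지 체크하는 함수
--     stack = [a[0]]
--     for i in range(1, len(a)):
--         if a[i] in stack and stack[-1] != a[i]:
--             return False
--         else:
--             stack.append(a[i])
--
--     return True
-- ===== SOURCE B (Python) =====
-- def find_group_word(a):
--     # Loop-free: run-head letters via zip of adjacent chars, then set-uniqueness check.
--     heads = [a[0]] + [c for p, c in zip(a, a[1:]) if c != p]
--     return len(set(heads)) == len(heads)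
-- ===== Notes on version B (the rewrite author's own statement) =====
-- stated objective: faster
-- what changed: Replaces A's stateful early-exit scan with membership against the full prefix stack by a loop-free pipeline: zip adjacent characters to extract run-head letters, then one set-uniqueness check on that compressed list.
import Mathlib
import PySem

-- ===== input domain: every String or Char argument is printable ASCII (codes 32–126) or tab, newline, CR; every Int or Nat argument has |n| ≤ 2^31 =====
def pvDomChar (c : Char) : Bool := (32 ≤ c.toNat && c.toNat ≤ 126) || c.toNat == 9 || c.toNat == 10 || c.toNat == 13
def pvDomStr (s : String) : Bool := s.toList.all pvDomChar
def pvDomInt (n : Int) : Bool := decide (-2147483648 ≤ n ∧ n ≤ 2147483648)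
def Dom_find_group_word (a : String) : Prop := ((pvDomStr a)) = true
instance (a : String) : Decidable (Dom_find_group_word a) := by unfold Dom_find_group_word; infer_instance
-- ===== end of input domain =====

-- B replaces A's stateful early-exit scan (membership against the full prefix stack) by a
-- loop-free pipeline: zip adjacent characters to pick out run-head letters, then one
-- set-uniqueness check on that compressed list; same exact return value.

-- ===== PORT A =====
-- loop 'for i in range(1, len(a))' over the remaining characters, carrying the stack
def pvALoop (stack : List Char) (rest : List Char) : Bool :=
  match rest with
  | [] => true
  | c :: r =>
    if c ∈ stack ∧ stack.getLast? ≠ some c then false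
    else pvALoop (stack ++ [c]) r

def find_group_word (a : String) : Bool :=
  match a.toList with
  | [] => true   -- unreachable under Pre_: Python raises IndexError on a[0] for ""
  | c :: r => pvALoop [c] r

-- ===== PORT B =====
-- heads = [a[0]] + [c for p, c in zip(a, a[1:]) if c != p]; return len(set(heads)) == len(heads)
def find_group_word_alt (a : String) : Bool :=
  match a.toList with
  | [] => true   -- unreachable under Pre_: Python raises IndexError on a[0] for ""
  | c :: r =>
    let heads := c :: ((List.zip (c :: r) r).filterMap
      (fun p => if p.2 ≠ p.1 then some p.2 else none))
    (PySem.Set.ofList heads).length == heads.length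

-- ===== PRECONDITION & SPEC =====
-- Pre_ excludes only the empty string, on which Python A (and B) raise IndexError at a[0].
def Pre_find_group_word (a : String) : Prop := a ≠ ""
instance (a : String) : Decidable (Pre_find_group_word a) := by unfold Pre_find_group_word; infer_instance

def pvWitness_find_group_word : String := "aabbb"

def Spec_find_group_word (a : String) (out : Bool) : Prop := out = find_group_word_alt a
instance (a : String) (out : Bool) : Decidable (Spec_find_group_word a out) := by unfold Spec_find_group_word; infer_instance

-- ===== CLAIM (what is proved, stated in full; the proofs are below) =====
def Claim_equal_find_group_word : Prop := ∀ (a : String), Dom_find_group_word a → Pre_find_group_word a → Spec_find_group_word a (find_group_word a)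

-- ===== LEMMAS AND PROOFS =====

-- proof-only helper: the run-head list built incrementally (appending a char when it
-- differs from the current last head); used to bridge A's loop and B's zip/filter form
def pvRuns (runs : List Char) (rest : List Char) : List Char :=
  match rest with
  | [] => runs
  | c :: r =>
    if runs.getLast? ≠ some c then pvRuns (runs ++ [c]) r
    else pvRuns runs r

-- pvRuns only appends to runs
theorem pvRuns_prefix (rest runs : List Char) : ∃ t, pvRuns runs rest = runs ++ t := by
  induction rest generalizing runs with
  | nil => exact ⟨[], by simp [pvRuns]⟩
  | cons c r ih =>
    simp only [pvRuns]
    split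
    · obtain ⟨t, ht⟩ := ih (runs ++ [c])
      exact ⟨[c] ++ t, by simp [ht]⟩
    · exact ih runs

theorem pvRuns_not_nodup (rest runs : List Char) (h : ¬ runs.Nodup) :
    ¬ (pvRuns runs rest).Nodup := by
  obtain ⟨t, ht⟩ := pvRuns_prefix rest runs
  rw [ht]
  intro hn
  exact h (List.nodup_append.mp hn).1

-- B's zip/filterMap expression is pvRuns
theorem pv_zip_runs (rest : List Char) : ∀ (acc : List Char) (prev : Char),
    acc.getLast? = some prev →
    pvRuns acc rest = acc ++ ((List.zip (prev :: rest) rest).filterMap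
      (fun p => if p.2 ≠ p.1 then some p.2 else none)) := by
  induction rest with
  | nil => intro acc prev _; simp [pvRuns]
  | cons c r ih =>
    intro acc prev hlast
    simp only [pvRuns, List.zip_cons_cons, List.filterMap_cons, hlast]
    by_cases hc : c = prev
    · subst hc
      simpa using ih acc c hlast
    · have h1 : (some prev ≠ some c) := by simpa using Ne.symm hc
      rw [if_pos h1, ih (acc ++ [c]) c (by simp)]
      simp [hc]

-- set(xs) has first occurrences in order, so it is a sublist of xs
theorem pv_ofList_sublist (l : List Char) : (PySem.Set.ofList l).Sublist l := by
  induction l using List.reverseRecOn with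
  | nil => simp [PySem.Set.ofList]
  | append_singleton xs x ih =>
    rw [PySem.Set.ofList_append_singleton, PySem.Set.add_eq_ite]
    split
    · exact ih.trans (List.sublist_append_left xs [x])
    · exact List.Sublist.append ih (List.Sublist.refl [x])

-- len(set(l)) == len(l) decides Nodup l
theorem pv_set_len (l : List Char) :
    ((PySem.Set.ofList l).length == l.length) = (if l.Nodup then true else false) := by
  by_cases h : l.Nodup
  · simp [h, PySem.Set.ofList_eq_self_of_nodup _ h]
  · have hs := pv_ofList_sublist l
    have hne : (PySem.Set.ofList l).length ≠ l.length := by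
      intro he
      exact h (hs.eq_of_length he ▸ PySem.Set.nodup_ofList l)
    simp [h, hne]

-- main invariant: A's answer is the Nodup-ness of the compressed run-head list
theorem pv_key (rest : List Char) : ∀ (stack runs : List Char),
    runs.Nodup → (∀ c, c ∈ stack ↔ c ∈ runs) → stack.getLast? = runs.getLast? →
    (pvALoop stack rest = (if (pvRuns runs rest).Nodup then true else false)) := by
  induction rest with
  | nil =>
    intro stack runs hnd _ _
    simp [pvALoop, pvRuns, hnd]
  | cons c r ih =>
    intro stack runs hnd hmem hlast
    simp only [pvALoop, pvRuns, hlast]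
    by_cases hl : runs.getLast? = some c
    · -- last run head is c: A appends (no new run head), B keeps runs unchanged
      have hcr : c ∈ runs := by
        obtain ⟨ys, hy⟩ := List.getLast?_eq_some_iff.mp hl
        simp [hy]
      have h2 : (runs.getLast? ≠ some c) = False := by simp [hl]
      simp only [h2, and_false, if_false]
      refine ih (stack ++ [c]) runs hnd (fun d => ?_) (by simp [hl])
      constructor
      · intro hd
        rcases List.mem_append.mp hd with h | h
        · exact (hmem d).mp h
        · simp at h; subst h; exact hcr
      · intro hd
        exact List.mem_append.mpr (Or.inl ((hmem d).mpr hd))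
    · -- a new run head c: B appends c to runs
      have h2 : (runs.getLast? ≠ some c) = True := eq_true hl
      simp only [h2, and_true, if_true]
      by_cases hcs : c ∈ stack
      · -- A returns False; runs ++ [c] already has a duplicate
        rw [if_pos hcs]
        have hdup : ¬ (runs ++ [c]).Nodup := by
          intro hn
          exact (List.disjoint_of_nodup_append hn) ((hmem c).mp hcs) (by simp)
        simp [pvRuns_not_nodup r (runs ++ [c]) hdup]
      · -- a fresh letter: both sides append, apply IH
        rw [if_neg hcs]
        refine ih (stack ++ [c]) (runs ++ [c]) ?_ (fun d => ?_) (by simp)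
        · have hc : c ∉ runs := fun hc => hcs ((hmem c).mpr hc)
          rw [List.nodup_append]
          exact ⟨hnd, List.nodup_singleton c, fun d hd e he => by
            rw [List.mem_singleton] at he; subst he; exact fun hde => hc (hde ▸ hd)⟩
        · simp [List.mem_append, hmem d]

-- ===== VERDICT (by name: the statement is the Claim_ definition above) =====
theorem find_group_word_spec : Claim_equal_find_group_word := by
  intro a _ _
  unfold Spec_find_group_word find_group_word find_group_word_alt
  cases h : a.toList with
  | nil => rfl
  | cons c r =>
    simp only []
    have hz := pv_zip_runs r [c] c rfl
    rw [List.singleton_append] at hz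
    rw [← hz, pv_set_len]
    exact pv_key r [c] [c] (by simp) (fun d => Iff.rfl) rfl
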